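-- pv_equiv track=rewrite | github.com/PurdueElectricRacing/DaqApp | tools/ihex_parse.py | crc_update
-- ===== SOURCE A (Python) =====
-- def crc_update(data, prev):
--     crc = prev ^ data
--     idx = 0
--     while (idx < 32):
--         if (crc & 0x80000000): crc = ((crc << 1) ^ 0x04C11DB7) & 0xFFFFFFFF
--         else: crc = (crc << 1) & 0xFFFFFFFF
--         idx += 1
--     return crc
-- ===== SOURCE B (Python) =====
-- _POLY = 0x04C11DB7
--
--
-- def _crc_table():
--     table = []
--     for i in range(256):
--         c = (i << 24) & 0xFFFFFFFF
--         for _ in range(8):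
--             if c & 0x80000000:
--                 c = ((c << 1) ^ _POLY) & 0xFFFFFFFF
--             else:
--                 c = (c << 1) & 0xFFFFFFFF
--         table.append(c)
--     return table
--
--
-- _TABLE = _crc_table()
--
--
-- def crc_update(data, prev):
--     crc = (prev ^ data) & 0xFFFFFFFF
--     for _ in range(4):
--         crc = ((crc << 8) ^ _TABLE[(crc >> 24) & 0xFF]) & 0xFFFFFFFF
--     return crc
-- ===== Notes on version B (the rewrite author's own statement) =====
-- stated objective: faster
-- what changed: A's 32 bit-by-bit CRC rounds per word are replaced by 4 byte-wise steps through a 256-entry lookup table precomputed once at module scope.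
import Mathlib
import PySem

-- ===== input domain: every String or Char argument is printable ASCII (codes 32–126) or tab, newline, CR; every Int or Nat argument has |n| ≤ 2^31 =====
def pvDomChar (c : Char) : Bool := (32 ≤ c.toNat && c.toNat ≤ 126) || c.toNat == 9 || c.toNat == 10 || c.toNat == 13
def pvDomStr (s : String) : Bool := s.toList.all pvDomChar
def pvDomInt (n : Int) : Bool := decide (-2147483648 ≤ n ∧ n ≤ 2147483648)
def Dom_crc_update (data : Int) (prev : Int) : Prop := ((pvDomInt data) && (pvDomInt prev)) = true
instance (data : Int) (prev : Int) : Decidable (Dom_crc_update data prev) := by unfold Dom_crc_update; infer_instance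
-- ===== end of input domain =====

set_option maxHeartbeats 1000000


-- B replaces A's 32 bit-by-bit CRC rounds by 4 byte-wise steps through a precomputed
-- 256-entry lookup table (objective: faster by a constant factor).

-- ===== PORT A =====
-- one iteration of A's while-loop body
def crcRound (crc : Int) : Int :=
  if PySem.Int.band crc 2147483648 ≠ 0 then
    PySem.Int.band (PySem.Int.bxor (crc <<< (1 : Nat)) 79764919) 4294967295
  else
    PySem.Int.band (crc <<< (1 : Nat)) 4294967295

-- the while-loop: 32 iterations of crcRound
def crcLoopA : Nat → Int → Int
  | 0, crc => crc
  | n + 1, crc => crcLoopA n (crcRound crc)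

def crc_update (data : Int) (prev : Int) : Int :=
  crcLoopA 32 (PySem.Int.bxor prev data)

-- ===== PORT B =====
-- one iteration of the 8-round inner loop of B's _crc_table
def tblRound (c : Int) : Int :=
  if PySem.Int.band c 2147483648 ≠ 0 then
    PySem.Int.band (PySem.Int.bxor (c <<< (1 : Nat)) 79764919) 4294967295
  else
    PySem.Int.band (c <<< (1 : Nat)) 4294967295

def tblLoop : Nat → Int → Int
  | 0, c => c
  | n + 1, c => tblLoop n (tblRound c)

-- B's module-level _TABLE = _crc_table()
def crcTable : List Int :=
  (PySem.List.pyRange 0 256 1).map (fun (i : Int) => tblLoop 8 (PySem.Int.band (i <<< (24 : Nat)) 4294967295))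

-- one iteration of B's 4-step loop; .getD 0 only totalises the list indexing
-- (the index is proved in range below, so Python's _TABLE[…] never raises)
def byteStep (crc : Int) : Int :=
  PySem.Int.band
    (PySem.Int.bxor (crc <<< (8 : Nat))
      ((PySem.List.pyGet? crcTable (PySem.Int.band (crc >>> (24 : Nat)) 255)).getD 0))
    4294967295

def byteLoop : Nat → Int → Int
  | 0, c => c
  | n + 1, c => byteLoop n (byteStep c)

def crc_update_alt (data : Int) (prev : Int) : Int :=
  byteLoop 4 (PySem.Int.band (PySem.Int.bxor prev data) 4294967295)

-- ===== PRECONDITION & SPEC =====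
def Spec_crc_update (data : Int) (prev : Int) (out : Int) : Prop := out = crc_update_alt data prev
instance (data : Int) (prev : Int) (out : Int) : Decidable (Spec_crc_update data prev out) := by unfold Spec_crc_update; infer_instance

-- ===== CLAIM (what is proved, stated in full; the proofs are below) =====
def Claim_equal_crc_update : Prop := ∀ (data : Int) (prev : Int), Dom_crc_update data prev → Spec_crc_update data prev (crc_update data prev)

-- ===== LEMMAS AND PROOFS =====

-- the low 32 bits of an integer, as Python's `x & 0xFFFFFFFF` computes them
def l32 (a : Int) : Nat := (a % 4294967296).toNat

-- Nat model of one bit round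
def rN (x : Nat) : Nat :=
  if x.testBit 31 then ((x <<< 1) ^^^ 79764919) &&& 4294967295
  else (x <<< 1) &&& 4294967295

def rNL : Nat → Nat → Nat
  | 0, x => x
  | n + 1, x => rNL n (rN x)

-- Nat model of one table entry and one byte step
def tN (i : Nat) : Nat := rNL 8 ((i <<< 24) &&& 4294967295)

def bN (x : Nat) : Nat := ((x <<< 8) ^^^ tN ((x >>> 24) &&& 255)) &&& 4294967295

def bNL : Nat → Nat → Nat
  | 0, x => x
  | n + 1, x => bNL n (bN x)

-- ---------- generic Nat bit lemmas ----------

theorem xor_two_pow_sub_one (k : Nat) : ∀ x : Nat, x < 2 ^ k → (2 ^ k - 1) ^^^ x = 2 ^ k - 1 - x := by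
  induction k with
  | zero => intro x hx; interval_cases x; rfl
  | succ k ih =>
    intro x hx
    have h1 : 2 ^ (k + 1) = 2 * 2 ^ k := by ring
    have hq : x / 2 < 2 ^ k := by omega
    have step : (2 ^ (k + 1) - 1) ^^^ x = 2 * ((2 ^ k - 1) ^^^ (x / 2)) + (1 - x % 2) := by
      apply Nat.eq_of_testBit_eq
      intro i
      cases i with
      | zero =>
        rw [Nat.testBit_xor]
        simp only [Nat.testBit_zero]
        have hM : (2 ^ (k + 1) - 1) % 2 = 1 := by omega
        have h2 : x % 2 = 0 ∨ x % 2 = 1 := by omega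
        rcases h2 with h2 | h2
        · simp [hM, h2]
        · simp [hM, h2]
      | succ i =>
        rw [Nat.testBit_xor]
        simp only [Nat.testBit_succ]
        have hdiv1 : (2 ^ (k + 1) - 1) / 2 = 2 ^ k - 1 := by omega
        have hdiv2 : (2 * ((2 ^ k - 1) ^^^ x / 2) + (1 - x % 2)) / 2 = (2 ^ k - 1) ^^^ x / 2 := by
          omega
        rw [hdiv1, hdiv2, ← Nat.testBit_xor]
    rw [step, ih (x / 2) hq]
    omega

theorem xor_mod_two_pow_left (x p : Nat) (hp : p < 2 ^ 32) :
    (x % 2 ^ 32) ^^^ p = (x ^^^ p) % 2 ^ 32 := by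
  apply Nat.eq_of_testBit_eq
  intro i
  rw [Nat.testBit_xor, Nat.testBit_mod_two_pow, Nat.testBit_mod_two_pow, Nat.testBit_xor]
  by_cases hi : i < 32
  · simp [hi]
  · have hpb : p.testBit i = false :=
      Nat.testBit_lt_two_pow (lt_of_lt_of_le hp (Nat.pow_le_pow_right (by norm_num) (by omega)))
    simp [hi, hpb]

theorem and_mask_eq_mod (x : Nat) : x &&& 4294967295 = x % 4294967296 := by
  have h := Nat.and_two_pow_sub_one_eq_mod x 32
  norm_num at h
  exact h

theorem shl_xor_distrib (a b : Nat) : (a ^^^ b) <<< 1 = (a <<< 1) ^^^ (b <<< 1) := by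
  apply Nat.eq_of_testBit_eq
  intro i
  by_cases hi : 1 ≤ i
  · simp [Nat.testBit_shiftLeft, Nat.testBit_xor, hi]
  · simp [Nat.testBit_shiftLeft, Nat.testBit_xor, hi]

theorem and_xor_distrib_right' (a b m : Nat) : (a ^^^ b) &&& m = (a &&& m) ^^^ (b &&& m) := by
  apply Nat.eq_of_testBit_eq
  intro i
  simp [Nat.testBit_and, Nat.testBit_xor, Bool.and_xor_distrib_right]

-- ---------- Int → Nat bridge lemmas ----------

theorem l32_neg (n : Nat) : l32 (-(n : Int) - 1) = 4294967295 - n % 4294967296 := by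
  unfold l32
  omega

theorem l32_nonneg_eq (a : Int) (ha : 0 ≤ a) : l32 a = a.toNat % 4294967296 := by
  unfold l32
  omega

theorem l32_natCast (m : Nat) : l32 ((m : Nat) : Int) = m % 4294967296 := by
  unfold l32
  omega

theorem l32_lt (a : Int) : l32 a < 4294967296 := by
  unfold l32
  omega

theorem l32_cast (x : Nat) (hx : x < 4294967296) : l32 ((x : Nat) : Int) = x := by
  unfold l32
  omega

-- band with the 32-bit mask computes the low 32 bits, for every integer
theorem band_mask_eq (a : Int) : PySem.Int.band a 4294967295 = ((l32 a : Nat) : Int) := by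
  by_cases ha : 0 ≤ a
  · rw [PySem.Int.band_of_nonneg ha (by norm_num), l32_nonneg_eq a ha]
    have h1 : ((4294967295 : Int)).toNat = 4294967295 := rfl
    rw [h1, and_mask_eq_mod]
  · have hn : a = -((-a - 1).toNat : Int) - 1 := by omega
    rw [hn, l32_neg]
    set n := (-a - 1).toNat with hn'
    have hneg : ¬ (0 ≤ -(n : Int) - 1) := by omega
    simp only [PySem.Int.band, if_neg hneg, if_pos (by norm_num : (0:Int) ≤ 4294967295)]
    have h1 : ((4294967295 : Int)).toNat = 4294967295 := rfl
    have h2 : (-(-(n : Int) - 1) - 1).toNat = n := by omega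
    rw [h1, h2]
    rw [Nat.land_comm, and_mask_eq_mod]

-- the msb test of the branch condition, for every integer
theorem band_msb_iff (a : Int) : (PySem.Int.band a 2147483648 ≠ 0) ↔ (l32 a).testBit 31 = true := by
  by_cases ha : 0 ≤ a
  · rw [PySem.Int.band_of_nonneg ha (by norm_num)]
    have h1 : ((2147483648 : Int)).toNat = 2 ^ 31 := rfl
    rw [h1, Nat.and_two_pow, l32_nonneg_eq a ha]
    have h2 : (a.toNat % 4294967296).testBit 31 = a.toNat.testBit 31 := by
      have h := Nat.testBit_mod_two_pow a.toNat 32 31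
      norm_num at h
      exact h
    rw [h2]
    cases hb : a.toNat.testBit 31 <;> simp
  · have hn : a = -((-a - 1).toNat : Int) - 1 := by omega
    rw [hn, l32_neg]
    set n := (-a - 1).toNat with hn'
    have hneg : ¬ (0 ≤ -(n : Int) - 1) := by omega
    simp only [PySem.Int.band, if_neg hneg, if_pos (by norm_num : (0:Int) ≤ 2147483648)]
    have h1 : ((2147483648 : Int)).toNat = 2 ^ 31 := rfl
    have h2 : (-(-(n : Int) - 1) - 1).toNat = n := by omega
    rw [h1, h2, Nat.two_pow_and]
    have hsub : 4294967295 - n % 4294967296 = (2 ^ 32 - 1) ^^^ (n % 4294967296) := by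
      rw [xor_two_pow_sub_one 32 (n % 4294967296) (by omega)]
      norm_num
    rw [hsub]
    have hm : (n % 4294967296).testBit 31 = n.testBit 31 := by
      have h := Nat.testBit_mod_two_pow n 32 31
      norm_num at h
      exact h
    have ht : ((2 ^ 32 - 1) ^^^ n % 4294967296).testBit 31 = !(n.testBit 31) := by
      rw [Nat.testBit_xor, Nat.testBit_two_pow_sub_one, hm]
      simp
    rw [ht]
    cases hb : n.testBit 31 <;> simp

-- xor with a nonnegative 32-bit constant commutes with taking the low 32 bits
theorem l32_bxor (a : Int) (p : Nat) (hp : p < 4294967296) :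
    l32 (PySem.Int.bxor a ((p : Nat) : Int)) = (l32 a) ^^^ p := by
  have hp' : p < 2 ^ 32 := by omega
  by_cases ha : 0 ≤ a
  · rcases Int.eq_ofNat_of_zero_le ha with ⟨m, rfl⟩
    rw [PySem.Int.bxor_natCast, l32_natCast, l32_natCast]
    have h := xor_mod_two_pow_left m p hp'
    norm_num at h
    exact h.symm
  · have hn : a = -((-a - 1).toNat : Int) - 1 := by omega
    rw [hn]
    set n := (-a - 1).toNat with hn'
    have hneg : ¬ (0 ≤ -(n : Int) - 1) := by omega
    have hx : PySem.Int.bxor (-(n : Int) - 1) ((p : Nat) : Int) = -(((n ^^^ p : Nat) : Int)) - 1 := by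
      simp only [PySem.Int.bxor, if_neg hneg, if_pos (by positivity : (0:Int) ≤ ((p : Nat) : Int))]
      have h2 : (-(-(n : Int) - 1) - 1).toNat = n := by omega
      rw [h2, Int.toNat_natCast]
    rw [hx, l32_neg, l32_neg]
    have e1 : (4294967295 : Nat) - (n ^^^ p) % 4294967296 = (2 ^ 32 - 1) ^^^ ((n ^^^ p) % 4294967296) := by
      rw [xor_two_pow_sub_one 32 _ (by omega)]; norm_num
    have e2 : (4294967295 : Nat) - n % 4294967296 = (2 ^ 32 - 1) ^^^ (n % 4294967296) := by
      rw [xor_two_pow_sub_one 32 _ (by omega)]; norm_num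
    rw [e1, e2]
    have e3 : (n ^^^ p) % 4294967296 = (n % 4294967296) ^^^ p := by
      have h := xor_mod_two_pow_left n p hp'
      norm_num at h
      exact h.symm
    rw [e3, Nat.xor_assoc]

-- shifting left commutes with taking the low 32 bits
theorem l32_shl (a : Int) : l32 (a <<< (1 : Nat)) = ((l32 a) <<< 1) % 4294967296 := by
  unfold l32
  have h1 : a <<< (1 : Nat) = a * 2 := by rw [Int.shiftLeft_eq]; norm_num
  rw [h1, Nat.shiftLeft_eq, pow_one]
  omega

-- ---------- round bridge ----------

theorem rN_lt (x : Nat) : rN x < 4294967296 := by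
  unfold rN
  split <;> exact lt_of_le_of_lt Nat.and_le_right (by norm_num)

theorem crcRound_eq (a : Int) : crcRound a = ((rN (l32 a) : Nat) : Int) := by
  unfold crcRound rN
  have hcond := band_msb_iff a
  by_cases h : (l32 a).testBit 31 = true
  · rw [if_pos (hcond.mpr h), if_pos h]
    have hP : (79764919 : Int) = ((79764919 : Nat) : Int) := by norm_num
    rw [hP, band_mask_eq, l32_bxor _ 79764919 (by norm_num), l32_shl]
    congr 1
    rw [and_mask_eq_mod]
    have h2 := xor_mod_two_pow_left ((l32 a) <<< 1) 79764919 (by norm_num)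
    norm_num at h2
    exact h2
  · rw [if_neg (fun hc => h (hcond.mp hc)), if_neg h]
    rw [band_mask_eq, l32_shl]
    congr 1
    rw [and_mask_eq_mod]

theorem crcLoopA_cast (n : Nat) : ∀ x : Nat, x < 4294967296 → crcLoopA n ((x : Nat) : Int) = ((rNL n x : Nat) : Int) := by
  induction n with
  | zero => intro x _; rfl
  | succ n ih =>
    intro x hx
    show crcLoopA n (crcRound ((x : Nat) : Int)) = _
    rw [crcRound_eq, l32_cast x hx, ih (rN x) (rN_lt x)]
    rfl

-- ---------- byte-step bridge ----------

theorem tblLoop_eq_crcLoopA : ∀ (n : Nat) (c : Int), tblLoop n c = crcLoopA n c := by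
  intro n
  induction n with
  | zero => intro c; rfl
  | succ n ih =>
    intro c
    show tblLoop n (tblRound c) = crcLoopA n (crcRound c)
    rw [ih]
    rfl

theorem crcTable_get (j : Nat) (hj : j < 256) :
    (PySem.List.pyGet? crcTable ((j : Nat) : Int)).getD 0 = ((tN j : Nat) : Int) := by
  have h1 : crcTable[j]? = some (tblLoop 8 (PySem.Int.band (((j : Nat) : Int) <<< (24 : Nat)) 4294967295)) := by
    have h := PySem.List.getElem?_map_pyRange_zero
      (fun (i : Int) => tblLoop 8 (PySem.Int.band (i <<< (24 : Nat)) 4294967295)) 256 j hj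
    have e : (((256 : Nat) : Int)) = (256 : Int) := by norm_num
    rw [e] at h
    exact h
  rw [PySem.List.pyGet?_natCast, h1]
  show tblLoop 8 _ = _
  rw [tblLoop_eq_crcLoopA, ← Int.natCast_shiftLeft, band_mask_eq, crcLoopA_cast 8 _ (l32_lt _)]
  unfold tN
  rw [l32_natCast, ← and_mask_eq_mod]

theorem bN_lt (x : Nat) : bN x < 4294967296 := by
  unfold bN
  exact lt_of_le_of_lt Nat.and_le_right (by norm_num)

theorem byteStep_eq (x : Nat) : byteStep ((x : Nat) : Int) = ((bN x : Nat) : Int) := by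
  unfold byteStep bN
  have h255 : (255 : Int) = ((255 : Nat) : Int) := by norm_num
  rw [h255, ← Int.natCast_shiftRight, PySem.Int.band_natCast]
  have hj : (x >>> 24) &&& 255 < 256 := lt_of_le_of_lt Nat.and_le_right (by norm_num)
  rw [crcTable_get _ hj, ← Int.natCast_shiftLeft, PySem.Int.bxor_natCast]
  have hM : (4294967295 : Int) = ((4294967295 : Nat) : Int) := by norm_num
  rw [hM, PySem.Int.band_natCast]

theorem byteLoop_cast (n : Nat) : ∀ x : Nat, x < 4294967296 → byteLoop n ((x : Nat) : Int) = ((bNL n x : Nat) : Int) := by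
  induction n with
  | zero => intro x _; rfl
  | succ n ih =>
    intro x hx
    show byteLoop n (byteStep ((x : Nat) : Int)) = _
    rw [byteStep_eq x, ih (bN x) (bN_lt x)]
    rfl

-- ---------- the pure Nat equivalence ----------

theorem rNL_add (a b x : Nat) : rNL (a + b) x = rNL b (rNL a x) := by
  induction a generalizing x with
  | zero =>
    rw [Nat.zero_add]
    rfl
  | succ a ih =>
    have e : a + 1 + b = (a + b) + 1 := by omega
    rw [e]
    show rNL (a + b) (rN x) = rNL b (rNL (a + 1) x)
    rw [ih (rN x)]
    rfl

theorem rNL_succ_lt (n x : Nat) : rNL (n + 1) x < 4294967296 := by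
  induction n generalizing x with
  | zero => exact rN_lt x
  | succ n ih => exact ih (rN x)

-- one bit round on a value xored with a low (below-msb) disturbance
theorem rN_xor_low (h s : Nat) (hs : s < 2147483648) :
    rN (h ^^^ s) = rN h ^^^ (s <<< 1) := by
  have hsb : s.testBit 31 = false := Nat.testBit_lt_two_pow (by omega)
  have ht : (h ^^^ s).testBit 31 = h.testBit 31 := by
    rw [Nat.testBit_xor, hsb]
    simp
  have hs1 : (s <<< 1) &&& 4294967295 = s <<< 1 := by
    rw [and_mask_eq_mod, Nat.mod_eq_of_lt (by rw [Nat.shiftLeft_eq, pow_one]; omega)]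
  unfold rN
  rw [ht]
  by_cases hb : h.testBit 31 = true
  · rw [if_pos hb, if_pos hb, shl_xor_distrib]
    have e : (h <<< 1) ^^^ (s <<< 1) ^^^ 79764919 = ((h <<< 1) ^^^ 79764919) ^^^ (s <<< 1) := by
      rw [Nat.xor_assoc, Nat.xor_assoc, Nat.xor_comm (s <<< 1)]
    rw [e, and_xor_distrib_right', hs1]
  · rw [if_neg hb, if_neg hb, shl_xor_distrib, and_xor_distrib_right', hs1]

theorem shl_shl (x a : Nat) : (x <<< a) <<< 1 = x <<< (a + 1) := by
  rw [Nat.shiftLeft_eq, Nat.shiftLeft_eq, Nat.shiftLeft_eq, pow_succ]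
  ring

theorem rNL8_eq_bN (x : Nat) (hx : x < 4294967296) : rNL 8 x = bN x := by
  have hlo_lt : x % 16777216 < 16777216 := Nat.mod_lt _ (by norm_num)
  have hx24 : x >>> 24 < 256 := by
    rw [Nat.shiftRight_eq_div_pow]
    omega
  set lo := x % 16777216 with hlo
  set hi := (x >>> 24) <<< 24 with hhi
  have hsplit : x = hi ^^^ lo := by
    apply Nat.eq_of_testBit_eq
    intro i
    have e24 : (16777216 : Nat) = 2 ^ 24 := by norm_num
    rw [Nat.testBit_xor, hhi, hlo, e24, Nat.testBit_mod_two_pow,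
        Nat.testBit_shiftLeft, Nat.testBit_shiftRight]
    by_cases hi24 : 24 ≤ i
    · have e : 24 + (i - 24) = i := by omega
      have h24 : ¬ i < 24 := by omega
      simp [hi24, e, h24]
    · simp [hi24, Nat.lt_of_not_le hi24]
  have hb : ∀ k : Nat, k ≤ 7 → lo <<< k < 2147483648 := by
    intro k hk
    rw [Nat.shiftLeft_eq]
    have h2k : (2 : Nat) ^ k ≤ 128 := by
      calc (2 : Nat) ^ k ≤ 2 ^ 7 := Nat.pow_le_pow_right (by norm_num) hk
        _ = 128 := by norm_num
    have h2kpos : 0 < (2 : Nat) ^ k := Nat.two_pow_pos k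
    calc lo * 2 ^ k ≤ 16777215 * 128 := Nat.mul_le_mul (by omega) h2k
      _ < 2147483648 := by norm_num
  have hlo0 : lo ^^^ hi = hi ^^^ lo := Nat.xor_comm _ _
  have chain : rNL 8 (hi ^^^ lo) = rNL 8 hi ^^^ (lo <<< 8) := by
    have e0 : hi ^^^ lo = hi ^^^ (lo <<< 0) := by
      rw [Nat.shiftLeft_eq, pow_zero, Nat.mul_one]
    show rNL 7 (rN (hi ^^^ lo)) = _
    rw [e0, rN_xor_low hi _ (hb 0 (by norm_num)), shl_shl]
    show rNL 6 (rN (rN hi ^^^ lo <<< (0 + 1))) = _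
    rw [rN_xor_low _ _ (hb 1 (by norm_num)), shl_shl]
    show rNL 5 (rN (rN (rN hi) ^^^ lo <<< (0 + 1 + 1))) = _
    rw [rN_xor_low _ _ (hb 2 (by norm_num)), shl_shl]
    show rNL 4 (rN (rN (rN (rN hi)) ^^^ lo <<< (0 + 1 + 1 + 1))) = _
    rw [rN_xor_low _ _ (hb 3 (by norm_num)), shl_shl]
    show rNL 3 (rN (rN (rN (rN (rN hi))) ^^^ lo <<< (0 + 1 + 1 + 1 + 1))) = _
    rw [rN_xor_low _ _ (hb 4 (by norm_num)), shl_shl]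
    show rNL 2 (rN (rN (rN (rN (rN (rN hi)))) ^^^ lo <<< (0 + 1 + 1 + 1 + 1 + 1))) = _
    rw [rN_xor_low _ _ (hb 5 (by norm_num)), shl_shl]
    show rNL 1 (rN (rN (rN (rN (rN (rN (rN hi))))) ^^^ lo <<< (0 + 1 + 1 + 1 + 1 + 1 + 1))) = _
    rw [rN_xor_low _ _ (hb 6 (by norm_num)), shl_shl]
    show rN (rN (rN (rN (rN (rN (rN (rN hi)))))) ^^^ lo <<< (0 + 1 + 1 + 1 + 1 + 1 + 1 + 1)) = _
    rw [rN_xor_low _ _ (hb 7 (by norm_num)), shl_shl]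
    norm_num
    rfl
  have hidx : (x >>> 24) &&& 255 = x >>> 24 := by
    have h := Nat.and_two_pow_sub_one_eq_mod (x >>> 24) 8
    norm_num at h
    rw [h, Nat.mod_eq_of_lt hx24]
  have htn : tN (x >>> 24) = rNL 8 hi := by
    have hb24 : (x >>> 24) <<< 24 < 4294967296 := by
      rw [Nat.shiftLeft_eq]
      have e : (2 : Nat) ^ 24 = 16777216 := by norm_num
      rw [e]
      omega
    have harg : ((x >>> 24) <<< 24) &&& 4294967295 = hi := by
      rw [and_mask_eq_mod, Nat.mod_eq_of_lt hb24]
    unfold tN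
    rw [harg]
  have hshl8 : (x <<< 8) &&& 4294967295 = lo <<< 8 := by
    apply Nat.eq_of_testBit_eq
    intro i
    have eM : (4294967295 : Nat) = 2 ^ 32 - 1 := by norm_num
    have e24 : (16777216 : Nat) = 2 ^ 24 := by norm_num
    rw [Nat.testBit_and, eM, Nat.testBit_two_pow_sub_one, hlo, e24,
        Nat.testBit_shiftLeft, Nat.testBit_shiftLeft, Nat.testBit_mod_two_pow]
    by_cases h8 : 8 ≤ i
    · by_cases h32 : i < 32
      · have h24 : i - 8 < 24 := by omega
        simp [h8, h32, h24]
      · have h24 : ¬ (i - 8 < 24) := by omega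
        simp [h8, h32, h24]
    · simp [h8]
  have htnM : tN (x >>> 24) &&& 4294967295 = tN (x >>> 24) := by
    rw [htn, and_mask_eq_mod, Nat.mod_eq_of_lt (rNL_succ_lt 7 hi)]
  calc rNL 8 x = rNL 8 (hi ^^^ lo) := by rw [← hsplit]
    _ = rNL 8 hi ^^^ (lo <<< 8) := chain
    _ = bN x := by
        unfold bN
        rw [hidx, and_xor_distrib_right', hshl8, htnM, htn, Nat.xor_comm]

theorem main_nat (x : Nat) (hx : x < 4294967296) : rNL 32 x = bNL 4 x := by
  have e1 := rNL8_eq_bN x hx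
  have e2 := rNL8_eq_bN (bN x) (bN_lt x)
  have e3 := rNL8_eq_bN (bN (bN x)) (bN_lt _)
  have e4 := rNL8_eq_bN (bN (bN (bN x))) (bN_lt _)
  have hsplit : rNL 32 x = rNL 8 (rNL 8 (rNL 8 (rNL 8 x))) := by
    rw [show (32 : Nat) = 8 + 24 from rfl, rNL_add,
        show (24 : Nat) = 8 + 16 from rfl, rNL_add,
        show (16 : Nat) = 8 + 8 from rfl, rNL_add]
  rw [hsplit, e1, e2, e3, e4]
  rfl

-- ===== VERDICT (by name: the statement is the Claim_ definition above) =====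
theorem crc_update_spec : Claim_equal_crc_update := by
  intro data prev _
  unfold Spec_crc_update crc_update crc_update_alt
  have hc0 : crcLoopA 32 (PySem.Int.bxor prev data) =
      ((rNL 32 (l32 (PySem.Int.bxor prev data)) : Nat) : Int) := by
    show crcLoopA 31 (crcRound (PySem.Int.bxor prev data)) = _
    rw [crcRound_eq, crcLoopA_cast 31 _ (rN_lt _)]
    rfl
  rw [hc0, band_mask_eq, byteLoop_cast 4 _ (l32_lt _), main_nat _ (l32_lt _)]
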